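-- pv_equiv track=rewrite | github.com/hosshonarvar/SegNet | my_code/Src/parameters.py | initialize_parameters_layer
-- ===== SOURCE A (Python) =====
-- conv_layers = {1:2, 2:2, 3:3, 4:3, 5:3, 6:3, 7:3, 8:3, 9:2, 10:3}
--
-- num_boxes = len(conv_layers)+1
--
-- def initialize_parameters_layer(num_classes):
--
--     # Dictionary of filters for each conv layer
--     filters_layers = {}
--     for box_b in range(1, num_boxes):
--         for layer_l in range(1, conv_layers[box_b]+1):
--
--             filt_name = 'f_'+str(box_b)+'_'+str(layer_l)
--
--             # No filter for pretrained VGG16 layers in encoder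
--             if box_b<=5:
--                 filters_layers.update([(filt_name, [])])
--
--             # 13 filters for conv layers in decoder
--             if box_b==6:
--                 filters_layers.update([(filt_name, [3, 3, 512, 512])])
--             elif box_b==7:
--                 if layer_l<=2:
--                     filters_layers.update([(filt_name, [3, 3, 512, 512])])
--                 elif layer_l==3:
--                     filters_layers.update([(filt_name, [3, 3, 512, 256])])
--             elif box_b==8:
--                 if layer_l<=2:
--                     filters_layers.update([(filt_name, [3, 3, 256, 256])])
--                 elif layer_l==3:
--                     filters_layers.update([(filt_name, [3, 3, 256, 128])])
--             elif box_b==9: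
--                 if layer_l==1:
--                     filters_layers.update([(filt_name, [3, 3, 128, 128])])
--                 elif layer_l==2:
--                     filters_layers.update([(filt_name, [3, 3, 128, 64])])
--             elif box_b==10:
--                 if layer_l<=2:
--                     filters_layers.update([(filt_name, [3, 3, 64, 64])])
--                 elif layer_l==3:
--                     filters_layers.update([(filt_name,
--                                             [1, 1, 64, num_classes])])
--
--     return filters_layers
-- ===== SOURCE B (Python) =====
-- def initialize_parameters_layer(num_classes):
--     # Flat static table; only the last entry depends on num_classes.
--     return {
--         'f_1_1': [], 'f_1_2': [],
--         'f_2_1': [], 'f_2_2': [],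
--         'f_3_1': [], 'f_3_2': [], 'f_3_3': [],
--         'f_4_1': [], 'f_4_2': [], 'f_4_3': [],
--         'f_5_1': [], 'f_5_2': [], 'f_5_3': [],
--         'f_6_1': [3, 3, 512, 512], 'f_6_2': [3, 3, 512, 512], 'f_6_3': [3, 3, 512, 512],
--         'f_7_1': [3, 3, 512, 512], 'f_7_2': [3, 3, 512, 512], 'f_7_3': [3, 3, 512, 256],
--         'f_8_1': [3, 3, 256, 256], 'f_8_2': [3, 3, 256, 256], 'f_8_3': [3, 3, 256, 128],
--         'f_9_1': [3, 3, 128, 128], 'f_9_2': [3, 3, 128, 64],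
--         'f_10_1': [3, 3, 64, 64], 'f_10_2': [3, 3, 64, 64],
--         'f_10_3': [1, 1, 64, num_classes],
--     }
-- ===== Notes on version B (the rewrite author's own statement) =====
-- stated objective: simpler
-- what changed: Replaced the nested range loops over conv_layers and the if/elif cascade by one flat dict literal of all entries, with num_classes substituted only in the final entry.
import Mathlib
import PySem

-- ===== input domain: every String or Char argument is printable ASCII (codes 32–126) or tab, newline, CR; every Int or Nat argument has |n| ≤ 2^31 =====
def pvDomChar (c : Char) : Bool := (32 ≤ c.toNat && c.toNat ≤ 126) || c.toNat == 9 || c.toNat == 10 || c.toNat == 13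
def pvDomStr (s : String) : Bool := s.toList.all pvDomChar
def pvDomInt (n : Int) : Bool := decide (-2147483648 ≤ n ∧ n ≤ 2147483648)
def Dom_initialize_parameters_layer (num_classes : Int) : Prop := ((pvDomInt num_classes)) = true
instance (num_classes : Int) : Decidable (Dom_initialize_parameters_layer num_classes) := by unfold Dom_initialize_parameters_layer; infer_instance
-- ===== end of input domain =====

-- B replaces A's nested loops and if/elif cascade by one flat literal association list (simpler).

-- ===== PORT A =====
def conv_layers : PySem.Dict Int Int :=
  PySem.Dict.ofList [(1,2), (2,2), (3,3), (4,3), (5,3), (6,3), (7,3), (8,3), (9,2), (10,3)]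

def num_boxes : Int := conv_layers.size + 1

def initialize_parameters_layer (num_classes : Int) : List (String × List Int) :=
  ((PySem.List.pyRange 1 num_boxes 1).foldl (fun filters_layers box_b =>
    (PySem.List.pyRange 1 (conv_layers.getD box_b 0 + 1) 1).foldl (fun filters_layers layer_l =>
      let filt_name := "f_" ++ PySem.Int.toStr box_b ++ "_" ++ PySem.Int.toStr layer_l
      -- if box_b<=5: update
      let filters_layers :=
        if box_b ≤ 5 then filters_layers.update [(filt_name, ([] : List Int))] else filters_layers
      -- if box_b==6 elif … cascade
      if box_b == 6 then filters_layers.update [(filt_name, [3, 3, 512, 512])]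
      else if box_b == 7 then
        if layer_l ≤ 2 then filters_layers.update [(filt_name, [3, 3, 512, 512])]
        else if layer_l == 3 then filters_layers.update [(filt_name, [3, 3, 512, 256])]
        else filters_layers
      else if box_b == 8 then
        if layer_l ≤ 2 then filters_layers.update [(filt_name, [3, 3, 256, 256])]
        else if layer_l == 3 then filters_layers.update [(filt_name, [3, 3, 256, 128])]
        else filters_layers
      else if box_b == 9 then
        if layer_l == 1 then filters_layers.update [(filt_name, [3, 3, 128, 128])]
        else if layer_l == 2 then filters_layers.update [(filt_name, [3, 3, 128, 64])]
        else filters_layers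
      else if box_b == 10 then
        if layer_l ≤ 2 then filters_layers.update [(filt_name, [3, 3, 64, 64])]
        else if layer_l == 3 then filters_layers.update [(filt_name, [1, 1, 64, num_classes])]
        else filters_layers
      else filters_layers)
      filters_layers)
    PySem.Dict.empty).items

-- ===== PORT B =====
def initialize_parameters_layer_alt (num_classes : Int) : List (String × List Int) :=
  [("f_1_1", []), ("f_1_2", []),
   ("f_2_1", []), ("f_2_2", []),
   ("f_3_1", []), ("f_3_2", []), ("f_3_3", []),
   ("f_4_1", []), ("f_4_2", []), ("f_4_3", []),
   ("f_5_1", []), ("f_5_2", []), ("f_5_3", []),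
   ("f_6_1", [3, 3, 512, 512]), ("f_6_2", [3, 3, 512, 512]), ("f_6_3", [3, 3, 512, 512]),
   ("f_7_1", [3, 3, 512, 512]), ("f_7_2", [3, 3, 512, 512]), ("f_7_3", [3, 3, 512, 256]),
   ("f_8_1", [3, 3, 256, 256]), ("f_8_2", [3, 3, 256, 256]), ("f_8_3", [3, 3, 256, 128]),
   ("f_9_1", [3, 3, 128, 128]), ("f_9_2", [3, 3, 128, 64]),
   ("f_10_1", [3, 3, 64, 64]), ("f_10_2", [3, 3, 64, 64]),
   ("f_10_3", [1, 1, 64, num_classes])]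

-- ===== PRECONDITION & SPEC =====
def Spec_initialize_parameters_layer (num_classes : Int) (out : List (String × List Int)) : Prop := out = initialize_parameters_layer_alt num_classes
instance (num_classes : Int) (out : List (String × List Int)) : Decidable (Spec_initialize_parameters_layer num_classes out) := by unfold Spec_initialize_parameters_layer; infer_instance

-- ===== CLAIM (what is proved, stated in full; the proofs are below) =====
def Claim_equal_initialize_parameters_layer : Prop := ∀ (num_classes : Int), Dom_initialize_parameters_layer num_classes → Spec_initialize_parameters_layer num_classes (initialize_parameters_layer num_classes)

-- ===== LEMMAS AND PROOFS =====

-- ===== VERDICT (by name: the statement is the Claim_ definition above) =====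
set_option maxRecDepth 20000 in
theorem initialize_parameters_layer_spec : Claim_equal_initialize_parameters_layer := by
  intro n _
  unfold Spec_initialize_parameters_layer
  simp only [initialize_parameters_layer, initialize_parameters_layer_alt,
    show PySem.List.pyRange 1 num_boxes 1 = [1,2,3,4,5,6,7,8,9,10] from by decide]
  simp [List.foldl, PySem.Dict.update, PySem.Dict.insert, PySem.Dict.contains,
    PySem.Dict.empty, PySem.Dict.getD, PySem.Dict.get?, conv_layers,
    PySem.Dict.ofList, PySem.List.pyRange, List.range_succ,
    show PySem.Int.toStr 1 = "1" from by decide, show PySem.Int.toStr 2 = "2" from by decide,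
    show PySem.Int.toStr 3 = "3" from by decide, show PySem.Int.toStr 4 = "4" from by decide,
    show PySem.Int.toStr 5 = "5" from by decide, show PySem.Int.toStr 6 = "6" from by decide,
    show PySem.Int.toStr 7 = "7" from by decide, show PySem.Int.toStr 8 = "8" from by decide,
    show PySem.Int.toStr 9 = "9" from by decide, show PySem.Int.toStr 10 = "10" from by decide]
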